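-- pv_equiv track=rewrite | github.com/scottish-james/markdown-app-v4 | src/converters/enhanced_pptx_processor.py | has_hierarchical_arrangement
-- ===== SOURCE A (Python) =====
-- def has_hierarchical_arrangement(shapes):
--     """Check if shapes are arranged hierarchically (org chart, tree structure)"""
--     positioned_shapes = [s for s in shapes if "position" in s]
--     if len(positioned_shapes) < 3:
--         return False
--
--     # Sort by vertical position
--     sorted_by_top = sorted(positioned_shapes, key=lambda x: x["position"]["top"])
--
--     # Check if there are clear levels (groups of shapes at similar heights)
--     levels = []
--     current_level = []
--     tolerance = 50  # EMU tolerance for same level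
--
--     for shape in sorted_by_top:
--         if not current_level:
--             current_level.append(shape)
--         elif abs(shape["position"]["top"] - current_level[0]["position"]["top"]) <= tolerance:
--             current_level.append(shape)
--         else:
--             levels.append(current_level)
--             current_level = [shape]
--
--     if current_level:
--         levels.append(current_level)
--
--     # Hierarchical if we have at least 2 levels with the top having fewer items
--     return len(levels) >= 2 and len(levels[0]) <= len(levels[1])
-- ===== SOURCE B (Python) =====
-- def has_hierarchical_arrangement(shapes):
--     """Check if shapes are arranged hierarchically (org chart, tree structure)"""
--     positioned = [s for s in shapes if "position" in s]
--     if len(positioned) < 3: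
--         return False
--     tolerance = 50
--     tops = [s["position"]["top"] for s in positioned]
--     # first level: everything within tolerance of the global minimum top
--     m0 = min(tops)
--     rest = [t for t in tops if t > m0 + tolerance]
--     if not rest:
--         return False  # only one level
--     # second level: everything within tolerance of the minimum of the remainder
--     m1 = min(rest)
--     level0 = sum(1 for t in tops if t <= m0 + tolerance)
--     level1 = sum(1 for t in rest if t <= m1 + tolerance)
--     return level0 <= level1
-- ===== Notes on version B (the rewrite author's own statement) =====
-- stated objective: alternative
-- what changed: Replaces the sort + sequential level-grouping fold with min/count passes over the tops: the first two levels (the only ones the verdict uses) are recovered as tolerance bands above the global minimum and above the minimum of the remainder, so no sort and no levels list are built.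
import Mathlib
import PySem

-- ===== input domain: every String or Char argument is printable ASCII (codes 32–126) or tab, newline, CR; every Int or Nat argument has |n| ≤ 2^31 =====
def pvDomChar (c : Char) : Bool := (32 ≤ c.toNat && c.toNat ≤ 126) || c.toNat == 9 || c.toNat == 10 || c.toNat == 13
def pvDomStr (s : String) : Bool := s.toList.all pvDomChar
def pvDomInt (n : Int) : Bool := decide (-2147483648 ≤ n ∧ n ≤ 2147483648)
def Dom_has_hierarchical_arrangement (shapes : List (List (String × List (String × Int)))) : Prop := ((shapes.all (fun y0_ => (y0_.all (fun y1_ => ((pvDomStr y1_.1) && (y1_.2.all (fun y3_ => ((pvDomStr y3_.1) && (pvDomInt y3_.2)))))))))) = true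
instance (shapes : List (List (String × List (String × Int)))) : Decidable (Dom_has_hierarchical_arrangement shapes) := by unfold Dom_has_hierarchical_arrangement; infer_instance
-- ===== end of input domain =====

-- B replaces A's sort + level-grouping fold by two linear min/count passes over the tops
-- (only the first two levels of A's grouping determine the verdict).


-- shared shape accessors: "position" in s, and s["position"]["top"]
-- (the .getD [] / .getD 0 defaults are never reached on Pre_ inputs: "top" is present there)
def pvHasPos (s : List (String × List (String × Int))) : Bool :=
  ((PySem.Dict.mk s).get? "position").isSome

def pvTop (s : List (String × List (String × Int))) : Int :=
  ((PySem.Dict.mk (((PySem.Dict.mk s).get? "position").getD [])).get? "top").getD 0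

-- ===== PORT A =====
-- one step of A's level-grouping loop (state: (levels, current_level))
def pvStep (st : List (List (List (String × List (String × Int)))) × List (List (String × List (String × Int))))
    (shape : List (String × List (String × Int))) :
    List (List (List (String × List (String × Int)))) × List (List (String × List (String × Int))) :=
  if st.2 = [] then (st.1, st.2 ++ [shape])
  else if |pvTop shape - pvTop (st.2.headD [])| ≤ 50 then (st.1, st.2 ++ [shape])
  else (st.1 ++ [st.2], [shape])

def has_hierarchical_arrangement (shapes : List (List (String × List (String × Int)))) : Bool :=
  let positioned := shapes.filter (fun s => pvHasPos s)
  if positioned.length < 3 then false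
  else
    let sortedByTop := PySem.List.sorted positioned (fun s => pvTop s) false
    let st := sortedByTop.foldl pvStep ([], [])
    let levels := if st.2 ≠ [] then st.1 ++ [st.2] else st.1
    decide (2 ≤ levels.length) && decide ((levels.getD 0 []).length ≤ (levels.getD 1 []).length)

-- ===== PORT B =====
def has_hierarchical_arrangement_alt (shapes : List (List (String × List (String × Int)))) : Bool :=
  let positioned := shapes.filter (fun s => pvHasPos s)
  if positioned.length < 3 then false
  else
    let tops := positioned.map (fun s => pvTop s)
    let m0 := (PySem.List.min? tops (fun t => t)).getD 0
    let rest := tops.filter (fun t => decide (m0 + 50 < t))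
    if rest = [] then false
    else
      let m1 := (PySem.List.min? rest (fun t => t)).getD 0
      let level0 := tops.countP (fun t => decide (t ≤ m0 + 50))
      let level1 := rest.countP (fun t => decide (t ≤ m1 + 50))
      decide (level0 ≤ level1)

-- ===== PRECONDITION & SPEC =====
-- Pre_ excludes exactly the inputs where Python's A raises KeyError: at least 3 positioned
-- shapes and some positioned shape's "position" dict lacking a "top" key.
def Pre_has_hierarchical_arrangement (shapes : List (List (String × List (String × Int)))) : Prop :=
  (shapes.filter (fun s => pvHasPos s)).length < 3 ∨
  ∀ s ∈ shapes, pvHasPos s = true →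
    ((PySem.Dict.mk (((PySem.Dict.mk s).get? "position").getD [])).get? "top").isSome = true

instance (shapes : List (List (String × List (String × Int)))) : Decidable (Pre_has_hierarchical_arrangement shapes) := by
  unfold Pre_has_hierarchical_arrangement; infer_instance

def pvWitness_has_hierarchical_arrangement : (List (List (String × List (String × Int)))) :=
  [[("position", [("top", 0)])], [("position", [("top", 100)])], [("position", [("top", 120)])]]

def Spec_has_hierarchical_arrangement (shapes : List (List (String × List (String × Int)))) (out : Bool) : Prop := out = has_hierarchical_arrangement_alt shapes
instance (shapes : List (List (String × List (String × Int)))) (out : Bool) : Decidable (Spec_has_hierarchical_arrangement shapes out) := by unfold Spec_has_hierarchical_arrangement; infer_instance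

-- ===== CLAIM (what is proved, stated in full; the proofs are below) =====
def Claim_equal_has_hierarchical_arrangement : Prop := ∀ (shapes : List (List (String × List (String × Int)))), Dom_has_hierarchical_arrangement shapes → Pre_has_hierarchical_arrangement shapes → Spec_has_hierarchical_arrangement shapes (has_hierarchical_arrangement shapes)

-- ===== LEMMAS AND PROOFS =====

-- abbreviation for the shape type in the proofs
abbrev PvShape := List (String × List (String × Int))

theorem pv_takeWhile_eq_filter (f : PvShape → Int) (c : Int) :
    ∀ l : List PvShape, l.Pairwise (fun a b => f a ≤ f b) →
      l.takeWhile (fun s => decide (f s ≤ c)) = l.filter (fun s => decide (f s ≤ c)) := by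
  intro l hl
  induction l with
  | nil => rfl
  | cons a t ih =>
    rcases List.pairwise_cons.mp hl with ⟨ha, ht⟩
    by_cases hac : f a ≤ c
    · simp [hac, ih ht]
    · simp only [List.takeWhile_cons, List.filter_cons, hac, decide_false]
      simp only [Bool.false_eq_true, if_false]
      symm
      rw [List.filter_eq_nil_iff]
      intro s hs
      simp only [decide_eq_true_eq]
      have := ha s hs
      omega

theorem pv_dropWhile_eq_filter (f : PvShape → Int) (c : Int) :
    ∀ l : List PvShape, l.Pairwise (fun a b => f a ≤ f b) →
      l.dropWhile (fun s => decide (f s ≤ c)) = l.filter (fun s => decide (c < f s)) := by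
  intro l hl
  induction l with
  | nil => rfl
  | cons a t ih =>
    rcases List.pairwise_cons.mp hl with ⟨ha, ht⟩
    by_cases hac : f a ≤ c
    · simp [hac, ih ht, show ¬ (c < f a) by omega]
    · simp only [List.dropWhile_cons, hac, decide_false]
      simp only [Bool.false_eq_true, if_false, List.filter_cons,
        show (decide (c < f a)) = true by simpa using by omega]
      simp only [if_true]
      congr 1
      symm
      rw [List.filter_eq_self]
      intro s hs
      have := ha s hs
      simpa using by omega

def pvGrp (cnt : List PvShape) (l : List PvShape) : List (List PvShape) :=
  match l with
  | [] => [cnt]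
  | s :: t =>
    if |pvTop s - pvTop (cnt.headD [])| ≤ 50 then pvGrp (cnt ++ [s]) t
    else cnt :: pvGrp [s] t

theorem pv_fold_eq_grp : ∀ (l : List PvShape) (levels : List (List PvShape)) (cnt : List PvShape),
    cnt ≠ [] →
    (let st := l.foldl pvStep (levels, cnt)
     if st.2 ≠ [] then st.1 ++ [st.2] else st.1) = levels ++ pvGrp cnt l := by
  intro l
  induction l with
  | nil =>
    intro levels cnt hcnt
    simp [pvGrp, hcnt]
  | cons s t ih =>
    intro levels cnt hcnt
    simp only [List.foldl_cons, pvGrp]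
    by_cases hc : |pvTop s - pvTop (cnt.headD [])| ≤ 50
    · have hstep : pvStep (levels, cnt) s = (levels, cnt ++ [s]) := by
        simp [pvStep, hcnt, -List.headD_eq_head?_getD, hc]
      rw [hstep, ih levels (cnt ++ [s]) (by simp), if_pos hc]
    · have hstep : pvStep (levels, cnt) s = (levels ++ [cnt], [s]) := by
        simp [pvStep, hcnt, -List.headD_eq_head?_getD, hc]
      rw [hstep, ih (levels ++ [cnt]) [s] (by simp), if_neg hc]
      simp

theorem pv_grp_split (cnt : List PvShape) (l : List PvShape) (hcnt : cnt ≠ [])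
    (hge : ∀ s ∈ l, pvTop (cnt.headD []) ≤ pvTop s)
    (hsort : l.Pairwise (fun a b => pvTop a ≤ pvTop b)) :
    pvGrp cnt l =
      (let a := pvTop (cnt.headD [])
       let g := l.takeWhile (fun s => decide (pvTop s ≤ a + 50))
       let r := l.dropWhile (fun s => decide (pvTop s ≤ a + 50))
       if r = [] then [cnt ++ g] else (cnt ++ g) :: pvGrp [r.headD []] r.tail) := by
  induction l generalizing cnt with
  | nil => simp [pvGrp]
  | cons s t ih =>
    rcases List.pairwise_cons.mp hsort with ⟨hs, ht⟩
    have ha : pvTop (cnt.headD []) ≤ pvTop s := hge s (by simp)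
    by_cases hc : pvTop s ≤ pvTop (cnt.headD []) + 50
    · have habs : |pvTop s - pvTop (cnt.headD [])| ≤ 50 := by
        rw [abs_le]; omega
      have hhead : (cnt ++ [s]).headD [] = cnt.headD [] := by
        cases cnt with
        | nil => exact absurd rfl hcnt
        | cons c cs => rfl
      have := ih (cnt ++ [s]) (by simp)
        (by intro x hx; rw [hhead]; exact le_trans ha (hs x hx)) ht
      simp only [pvGrp, if_pos habs, this, hhead]
      simp only [List.takeWhile_cons, List.dropWhile_cons, hc, if_pos, decide_true]
      simp [List.append_assoc]
    · have habs : ¬ |pvTop s - pvTop (cnt.headD [])| ≤ 50 := by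
        rw [abs_le]; omega
      simp only [pvGrp, if_neg habs]
      simp only [List.takeWhile_cons, List.dropWhile_cons, hc, decide_false]
      simp

theorem pv_min_getD (ts : List Int) (m : Int) (ms : List Int)
    (hperm : ts.Perm (m :: ms)) (hmin : ∀ y ∈ ms, m ≤ y) :
    (PySem.List.min? ts (fun t => t)).getD 0 = m := by
  have hne : ts ≠ [] := by
    intro h; subst h; exact absurd hperm.symm (by simp)
  obtain ⟨v, hv⟩ : ∃ v, PySem.List.min? ts (fun t => t) = some v := by
    cases h : PySem.List.min? ts (fun t => t) with
    | none => exact absurd ((PySem.List.min?_eq_none_iff ts (fun t => t)).mp h) hne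
    | some v => exact ⟨v, rfl⟩
  have hvmem : v ∈ ts := PySem.List.min?_mem hv
  have hvmin : ∀ y ∈ ts, v ≤ y := PySem.List.min?_isMin hv
  have hmem' : v ∈ m :: ms := hperm.mem_iff.mp hvmem
  have h1 : m ≤ v := by
    rcases List.mem_cons.mp hmem' with h | h
    · omega
    · exact hmin v h
  have h2 : v ≤ m := hvmin m (hperm.mem_iff.mpr (by simp))
  rw [hv]; simp; omega

-- the heart of the claim: the two ports agree on every input
theorem pv_main (shapes : List PvShape) :
    has_hierarchical_arrangement shapes = has_hierarchical_arrangement_alt shapes := by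
  unfold has_hierarchical_arrangement has_hierarchical_arrangement_alt
  set P := shapes.filter (fun s => pvHasPos s) with hP
  by_cases hlen : P.length < 3
  · simp [hlen]
  · simp only [if_neg hlen]
    set sp := PySem.List.sorted P (fun s => pvTop s) false with hsp
    have hperm : sp.Perm P := PySem.List.sorted_perm P (fun s => pvTop s) false
    have hpw : sp.Pairwise (fun a b => pvTop a ≤ pvTop b) := by
      have := PySem.List.sorted_pairwise P (fun s => pvTop s)
      exact this
    obtain ⟨x, l, hxl⟩ : ∃ x l, sp = x :: l := by
      cases hsp' : sp with
      | nil =>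
        exfalso
        have := hperm.length_eq
        rw [hsp'] at this
        simp at this
        omega
      | cons x l => exact ⟨x, l, rfl⟩
    rw [hxl] at hpw hperm
    rcases List.pairwise_cons.mp hpw with ⟨hxle, hlpw⟩
    -- A's fold
    have hfold0 : (x :: l).foldl pvStep ([], []) = l.foldl pvStep ([], [x]) := by
      simp [pvStep]
    have hlevels := pv_fold_eq_grp l [] [x] (by simp)
    -- the tolerance band split of l
    set g := l.takeWhile (fun s => decide (pvTop s ≤ pvTop x + 50)) with hg
    set r := l.dropWhile (fun s => decide (pvTop s ≤ pvTop x + 50)) with hr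
    have hsplit := pv_grp_split [x] l (by simp) (by simpa using hxle) hlpw
    simp only [List.headD] at hsplit
    -- B's data
    set tops := P.map (fun s => pvTop s) with htops
    have htperm : tops.Perm ((x :: l).map pvTop) := (hperm.map pvTop).symm
    have hm0 : (PySem.List.min? tops (fun t => t)).getD 0 = pvTop x := by
      apply pv_min_getD tops (pvTop x) (l.map pvTop) (by simpa using htperm)
      intro y hy
      rcases List.mem_map.mp hy with ⟨s, hs, rfl⟩
      exact hxle s hs
    rw [hm0]
    -- rest as a permutation of r.map pvTop
    have hfilmap : ∀ (c : Int) (L : List PvShape),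
        (L.map pvTop).filter (fun t => decide (c < t)) = (L.filter (fun s => decide (c < pvTop s))).map pvTop := by
      intro c L
      rw [List.filter_map]
      rfl
    have hrest : (tops.filter (fun t => decide (pvTop x + 50 < t))).Perm (r.map pvTop) := by
      have h1 : ((x :: l).map pvTop).filter (fun t => decide (pvTop x + 50 < t))
          = (l.filter (fun s => decide (pvTop x + 50 < pvTop s))).map pvTop := by
        rw [hfilmap]
        congr 1
        simp [show ¬ (pvTop x + 50 < pvTop x) by omega]
      have h2 : l.filter (fun s => decide (pvTop x + 50 < pvTop s)) = r := by
        rw [hr, pv_dropWhile_eq_filter pvTop (pvTop x + 50) l hlpw]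
      calc (tops.filter (fun t => decide (pvTop x + 50 < t))).Perm
            (((x :: l).map pvTop).filter (fun t => decide (pvTop x + 50 < t))) := htperm.filter _
        _ = (r.map pvTop) := by rw [h1, h2]
    -- rewrite A's side via the grouping characterization
    rw [hxl, hfold0]
    have hlev : (if (l.foldl pvStep ([], [x])).2 ≠ [] then
        (l.foldl pvStep ([], [x])).1 ++ [(l.foldl pvStep ([], [x])).2]
      else (l.foldl pvStep ([], [x])).1) = pvGrp [x] l := by simpa using hlevels
    rw [hlev]
    have hsplit' : pvGrp [x] l =
        (if r = [] then [[x] ++ g] else ([x] ++ g) :: pvGrp [r.headD []] r.tail) := hsplit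
    by_cases hre : r = []
    · -- only one level: both sides false
      have hrest0 : tops.filter (fun t => decide (pvTop x + 50 < t)) = [] := by
        have h2 := hrest
        rw [hre] at h2
        exact h2.eq_nil
      rw [if_pos hrest0, hsplit', if_pos hre]
      simp
    · obtain ⟨rh, rt, hrr⟩ : ∃ rh rt, r = rh :: rt := by
        cases hr' : r with
        | nil => exact absurd hr' hre
        | cons a b => exact ⟨a, b, rfl⟩
      have hrestne : tops.filter (fun t => decide (pvTop x + 50 < t)) ≠ [] := by
        intro h0
        have := hrest.length_eq
        rw [h0, hrr] at this
        simp at this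
      rw [if_neg hrestne, hsplit', if_neg hre, hrr]
      -- r is sorted (a suffix of l)
      have hrpw : (rh :: rt).Pairwise (fun a b => pvTop a ≤ pvTop b) := by
        rw [← hrr]
        exact hlpw.sublist (List.dropWhile_sublist _)
      rcases List.pairwise_cons.mp hrpw with ⟨hrh, hrtpw⟩
      set g1 := rt.takeWhile (fun s => decide (pvTop s ≤ pvTop rh + 50)) with hg1
      set r1 := rt.dropWhile (fun s => decide (pvTop s ≤ pvTop rh + 50)) with hr1
      have hsplit2 : pvGrp [rh] rt =
          (if r1 = [] then [[rh] ++ g1] else ([rh] ++ g1) :: pvGrp [r1.headD []] r1.tail) :=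
        pv_grp_split [rh] rt (by simp) (by simpa using hrh) hrtpw
      obtain ⟨tl, htl⟩ : ∃ tl, pvGrp [rh] rt = ([rh] ++ g1) :: tl := by
        by_cases h1 : r1 = []
        · exact ⟨[], by rw [hsplit2, if_pos h1]⟩
        · exact ⟨_, by rw [hsplit2, if_neg h1]⟩
      simp only [List.headD, List.tail_cons, htl]
      -- m1 is pvTop rh
      have hrest' : (tops.filter (fun t => decide (pvTop x + 50 < t))).Perm (pvTop rh :: rt.map pvTop) := by
        rw [hrr] at hrest
        simpa using hrest
      have hm1 : (PySem.List.min? (tops.filter (fun t => decide (pvTop x + 50 < t))) (fun t => t)).getD 0 = pvTop rh := by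
        apply pv_min_getD _ _ _ hrest'
        intro y hy
        rcases List.mem_map.mp hy with ⟨s, hs, rfl⟩
        exact hrh s hs
      rw [hm1]
      -- the two counts
      have hlevel0 : tops.countP (fun t => decide (t ≤ pvTop x + 50)) = ([x] ++ g).length := by
        rw [htperm.countP_eq, List.countP_map]
        have : l.countP ((fun t => decide (t ≤ pvTop x + 50)) ∘ pvTop) = g.length := by
          rw [List.countP_eq_length_filter, hg, pv_takeWhile_eq_filter pvTop (pvTop x + 50) l hlpw]
          rfl
        simp only [List.countP_cons, this]
        simp [show pvTop x ≤ pvTop x + 50 by omega, Nat.add_comm]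
      have hlevel1 : (tops.filter (fun t => decide (pvTop x + 50 < t))).countP
          (fun t => decide (t ≤ pvTop rh + 50)) = ([rh] ++ g1).length := by
        rw [hrest'.countP_eq]
        have : rt.countP ((fun t => decide (t ≤ pvTop rh + 50)) ∘ pvTop) = g1.length := by
          rw [List.countP_eq_length_filter, hg1, pv_takeWhile_eq_filter pvTop (pvTop rh + 50) rt hrtpw]
          rfl
        rw [show (pvTop rh :: rt.map pvTop).countP (fun t => decide (t ≤ pvTop rh + 50))
            = 1 + rt.countP ((fun t => decide (t ≤ pvTop rh + 50)) ∘ pvTop) by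
          simp only [List.countP_cons, List.countP_map]
          simp [show pvTop rh ≤ pvTop rh + 50 by omega, Nat.add_comm]]
        rw [this]
        simp [Nat.add_comm]
      rw [hlevel0, hlevel1]
      simp

-- ===== VERDICT (by name: the statement is the Claim_ definition above) =====
theorem has_hierarchical_arrangement_spec : Claim_equal_has_hierarchical_arrangement := by
  intro shapes _ _
  unfold Spec_has_hierarchical_arrangement
  exact pv_main shapes
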